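-- pv_equiv track=rewrite | github.com/chris-moreton/chess-compete | compete/cup.py | generate_bracket
-- ===== SOURCE A (Python) =====
-- def next_power_of_2(n: int) -> int:
--     """Return the next power of 2 >= n."""
--     return 1 << (n - 1).bit_length()
--
-- def generate_bracket(num_participants: int) -> list[tuple[int, int | None]]:
--     """
--     Generate seeded bracket matchups for a knockout tournament.
--
--     Returns list of (seed1, seed2) tuples where:
--     - seed1 is 1-indexed (1 = best seed)
--     - seed2 is None for byes
--
--     Standard seeding ensures 1 and 2 can only meet in the final:
--     - Top half: 1v16, 8v9, 4v13, 5v12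
--     - Bottom half: 2v15, 7v10, 3v14, 6v11
--     """
--     bracket_size = next_power_of_2(num_participants)
--     num_byes = bracket_size - num_participants
--
--     # Generate standard seeded matchups for bracket size
--     # This algorithm recursively builds the bracket so top seeds are spread out
--     def get_matchups(size: int) -> list[tuple[int, int]]:
--         if size == 2:
--             return [(1, 2)]
--
--         half = size // 2
--         lower_matchups = get_matchups(half)
--
--         matchups = []
--         for m1, m2 in lower_matchups:
--             # In a round of 'size', seed m1 plays seed (size+1 - m1)
--             # and seed m2 plays seed (size+1 - m2)
--             matchups.append((m1, size + 1 - m1))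
--             matchups.append((m2, size + 1 - m2))
--
--         return matchups
--
--     matchups = get_matchups(bracket_size)
--
--     # Convert to handle byes (any seed > num_participants becomes a bye)
--     result = []
--     for s1, s2 in matchups:
--         if s2 > num_participants:
--             result.append((s1, None))  # Bye for s1
--         else:
--             result.append((s1, s2))
--
--     return result
-- ===== SOURCE B (Python) =====
-- def generate_bracket(num_participants: int) -> list[tuple[int, int | None]]:
--     """Iterative version: build the flat standard seed order, then pair adjacent entries."""
--     bracket_size = 1 << (num_participants - 1).bit_length()
--     seeds = [1]
--     while len(seeds) < bracket_size:
--         n = len(seeds) * 2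
--         seeds = [x for s in seeds for x in (s, n + 1 - s)]
--     return [(seeds[i], None if seeds[i + 1] > num_participants else seeds[i + 1])
--             for i in range(0, len(seeds), 2)]
-- ===== Notes on version B (the rewrite author's own statement) =====
-- stated objective: alternative
-- what changed: Replaces the recursive matchup builder with an iterative construction of the flat standard seed order (repeated doubling of a seeds list) followed by a single adjacent-pairing pass that applies the bye rule.
import Mathlib
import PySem

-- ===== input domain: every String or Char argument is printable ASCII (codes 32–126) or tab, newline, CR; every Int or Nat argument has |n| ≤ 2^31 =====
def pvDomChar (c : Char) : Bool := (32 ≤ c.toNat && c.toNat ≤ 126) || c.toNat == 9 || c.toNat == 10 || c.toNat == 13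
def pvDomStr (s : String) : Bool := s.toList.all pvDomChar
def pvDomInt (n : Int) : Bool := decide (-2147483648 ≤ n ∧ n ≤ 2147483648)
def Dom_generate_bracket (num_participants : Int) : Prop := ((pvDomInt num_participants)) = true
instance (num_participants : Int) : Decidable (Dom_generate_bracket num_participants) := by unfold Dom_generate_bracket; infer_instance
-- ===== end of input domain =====

-- B replaces A's recursive matchup builder by an iterative flat seed-order construction
-- plus one adjacent-pairing pass (objective: alternative decomposition, same cost).
-- Python's n.bit_length(): number of bits of |n|; bit_length 0 = 0.  (shared numeric helper)
def pyBitLength (m : Int) : Nat := if m = 0 then 0 else Nat.log2 m.natAbs + 1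

-- ===== PORT A =====
-- A's recursive get_matchups; the `size < 2` branch is a totality guard
-- (Python recurses forever there; Pre_ excludes the inputs reaching it).
def get_matchups (size : Nat) : List (Int × Int) :=
  if size < 2 then []
  else if size = 2 then [(1, 2)]
  else
    (get_matchups (size / 2)).flatMap
      (fun p => [(p.1, (size : Int) + 1 - p.1), (p.2, (size : Int) + 1 - p.2)])
termination_by size
decreasing_by omega

def generate_bracket (num_participants : Int) : List (Int × Option Int) :=
  -- bracket_size = 1 << (n-1).bit_length()  (num_byes is computed but unused in A)
  let bracket_size : Int := 2 ^ pyBitLength (num_participants - 1)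
  let matchups := get_matchups bracket_size.toNat
  matchups.map (fun p =>
    if p.2 > num_participants then (p.1, none) else (p.1, some p.2))

-- ===== PORT B =====
-- seeds = [x for s in seeds for x in (s, n + 1 - s)] with n = len(seeds) * 2
def doubleSeeds (seeds : List Int) : List Int :=
  seeds.flatMap (fun s => [s, ((seeds.length * 2 : Nat) : Int) + 1 - s])

-- the `while len(seeds) < bracket_size` loop; fuel = bracket_size bounds the iterations
def buildSeeds : Nat → List Int → Nat → List Int
  | 0, seeds, _ => seeds
  | fuel + 1, seeds, target =>
      if seeds.length < target then buildSeeds fuel (doubleSeeds seeds) target else seeds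

-- final pairing comprehension over range(0, len(seeds), 2)
def pairAdj (num_participants : Int) : List Int → List (Int × Option Int)
  | s1 :: s2 :: rest =>
      (s1, if s2 > num_participants then none else some s2) :: pairAdj num_participants rest
  | _ => []

def generate_bracket_alt (num_participants : Int) : List (Int × Option Int) :=
  let bracket_size : Nat := 2 ^ pyBitLength (num_participants - 1)
  pairAdj num_participants (buildSeeds bracket_size [1] bracket_size)

-- ===== PRECONDITION & SPEC =====
-- Pre_ excludes num_participants = 1: there bracket_size = 1 and Python A's
-- get_matchups recurses forever (RecursionError); B's pairing also raises (IndexError).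
def Pre_generate_bracket (num_participants : Int) : Prop :=
  num_participants ≠ 1
instance (num_participants : Int) : Decidable (Pre_generate_bracket num_participants) := by
  unfold Pre_generate_bracket; infer_instance

def pvWitness_generate_bracket : Int := (8)

def Spec_generate_bracket (num_participants : Int) (out : List (Int × Option Int)) : Prop := out = generate_bracket_alt num_participants
instance (num_participants : Int) (out : List (Int × Option Int)) : Decidable (Spec_generate_bracket num_participants out) := by unfold Spec_generate_bracket; infer_instance

-- ===== CLAIM (what is proved, stated in full; the proofs are below) =====
def Claim_equal_generate_bracket : Prop := ∀ (num_participants : Int), Dom_generate_bracket num_participants → Pre_generate_bracket num_participants → Spec_generate_bracket num_participants (generate_bracket num_participants)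

-- ===== LEMMAS AND PROOFS =====

-- d-fold application of doubleSeeds (abstract trace of B's while loop)
def iterDouble : Nat → List Int → List Int
  | 0, s => s
  | d + 1, s => doubleSeeds (iterDouble d s)

-- flatten a matchup list back to the flat seed order
def flatPairs (l : List (Int × Int)) : List Int := l.flatMap (fun p => [p.1, p.2])

theorem doubleSeeds_length (s : List Int) : (doubleSeeds s).length = 2 * s.length := by
  induction s with
  | nil => rfl
  | cons a t ih =>
      simp [doubleSeeds, List.flatMap_cons] at *
      omega

theorem iterDouble_doubleSeeds (d : Nat) (s : List Int) :
    iterDouble d (doubleSeeds s) = doubleSeeds (iterDouble d s) := by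
  induction d with
  | zero => rfl
  | succ d ih => simp [iterDouble, ih]

theorem buildSeeds_eq (d : Nat) : ∀ (fuel : Nat) (seeds : List Int) (target : Nat),
    0 < seeds.length → seeds.length * 2 ^ d = target → d ≤ fuel →
    buildSeeds fuel seeds target = iterDouble d seeds := by
  induction d with
  | zero =>
      intro fuel seeds target hpos htar _
      simp at htar
      cases fuel with
      | zero => rfl
      | succ f => simp [buildSeeds, htar, iterDouble]
  | succ d ih =>
      intro fuel seeds target hpos htar hfuel
      cases fuel with
      | zero => omega
      | succ f =>
          have hlt : seeds.length < target := by
            have : 2 ^ (d + 1) ≥ 2 := by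
              have := Nat.one_le_two_pow (n := d); omega
            nlinarith
          simp only [buildSeeds, if_pos hlt]
          rw [ih f (doubleSeeds seeds) target
                (by rw [doubleSeeds_length]; omega)
                (by rw [doubleSeeds_length]; rw [← htar]; ring)
                (by omega)]
          simp [iterDouble, iterDouble_doubleSeeds]

theorem flatPairs_flatMap (c : Int) (l : List (Int × Int)) :
    flatPairs (l.flatMap (fun p => [(p.1, c - p.1), (p.2, c - p.2)]))
      = (flatPairs l).flatMap (fun s => [s, c - s]) := by
  induction l with
  | nil => rfl
  | cons p t ih => simp [flatPairs, List.flatMap_cons] at *; simp [ih]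

theorem pairAdj_flatPairs (np : Int) (l : List (Int × Int)) :
    pairAdj np (flatPairs l)
      = l.map (fun p => if p.2 > np then (p.1, none) else (p.1, some p.2)) := by
  induction l with
  | nil => rfl
  | cons p t ih =>
      simp only [flatPairs, List.flatMap_cons] at *
      simp only [List.cons_append, List.nil_append, pairAdj, List.map_cons, ih]
      by_cases h : p.2 > np <;> simp [h]

theorem iterDouble_flatPairs (d : Nat) (hd : 1 ≤ d) :
    iterDouble d [1] = flatPairs (get_matchups (2 ^ d))
      ∧ (iterDouble d [1]).length = 2 ^ d := by
  induction d with
  | zero => omega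
  | succ d ih =>
      cases Nat.eq_or_lt_of_le hd with
      | inl h1 =>
          -- d + 1 = 1
          have : d = 0 := by omega
          subst this
          have h2 : get_matchups 2 = [(1, 2)] := by rw [get_matchups]; norm_num
          refine ⟨?_, by decide⟩
          show doubleSeeds [1] = _
          norm_num [h2]; decide
      | inr h1 =>
          have hd1 : 1 ≤ d := by omega
          obtain ⟨ihe, ihl⟩ := ih hd1
          have hsize : get_matchups (2 ^ (d + 1))
              = (get_matchups (2 ^ d)).flatMap
                  (fun p => [(p.1, ((2 ^ (d + 1) : Nat) : Int) + 1 - p.1),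
                             (p.2, ((2 ^ (d + 1) : Nat) : Int) + 1 - p.2)]) := by
            rw [get_matchups]
            have h2 : ¬ (2 ^ (d + 1) < 2) := by
              have := Nat.one_le_two_pow (n := d); simp [pow_succ]; omega
            have h3 : ¬ (2 ^ (d + 1) = 2) := by
              have : 2 ^ d ≥ 2 := by
                calc 2 ^ d ≥ 2 ^ 1 := Nat.pow_le_pow_right (by omega) hd1
                _ = 2 := by norm_num
              simp [pow_succ]; omega
            have h4 : 2 ^ (d + 1) / 2 = 2 ^ d := by
              simp [pow_succ]
            simp [h2, h3, h4]
          constructor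
          · show doubleSeeds (iterDouble d [1]) = _
            rw [hsize, ihe]
            have hc : (((flatPairs (get_matchups (2 ^ d))).length * 2 : Nat) : Int)
                = ((2 ^ (d + 1) : Nat) : Int) := by
              rw [← ihe, ihl]; push_cast [pow_succ]; ring
            unfold doubleSeeds
            rw [hc]
            have := flatPairs_flatMap (((2 ^ (d + 1) : Nat) : Int) + 1) (get_matchups (2 ^ d))
            rw [this]
          · show (doubleSeeds (iterDouble d [1])).length = _
            rw [doubleSeeds_length, ihl, pow_succ]; ring

-- under Pre_, the exponent is at least 1
theorem bitLength_pos (np : Int) (h : np ≠ 1) : 1 ≤ pyBitLength (np - 1) := by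
  unfold pyBitLength
  have hne : np - 1 ≠ 0 := by omega
  rw [if_neg hne]
  omega

theorem toNat_two_pow (k : Nat) : ((2 : Int) ^ k).toNat = 2 ^ k := by
  rw [show ((2 : Int)) = ((2 : Nat) : Int) from rfl, ← Nat.cast_pow, Int.toNat_natCast]

-- ===== VERDICT (by name: the statement is the Claim_ definition above) =====
theorem generate_bracket_spec : Claim_equal_generate_bracket := by
  intro np _ hpre
  unfold Spec_generate_bracket generate_bracket generate_bracket_alt
  set k := pyBitLength (np - 1) with hk
  have hk1 : 1 ≤ k := bitLength_pos np hpre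
  obtain ⟨he, hl⟩ := iterDouble_flatPairs k hk1
  have hbuild : buildSeeds (2 ^ k) [1] (2 ^ k) = iterDouble k [1] := by
    apply buildSeeds_eq k (2 ^ k) [1] (2 ^ k) (by simp) (by simp)
    exact Nat.le_of_lt (Nat.lt_two_pow_self)
  simp only [toNat_two_pow, hbuild, he, pairAdj_flatPairs]
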